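-- pv_equiv track=rewrite | github.com/zaydons/MyLabVault | app/api/services/pdf_parser.py | infer_panel_from_test_name
-- ===== SOURCE A (Python) =====
-- from typing import Dict, List, Optional, Any
--
-- def infer_panel_from_test_name(test_name: str, ordered_panels: List[str]) -> Optional[str]:
--     """Try to infer which ordered panel a test belongs to based on common medical knowledge"""
--     if not test_name or not ordered_panels:
--         return None
--
--     test_name_lower = test_name.lower().replace('\n', ' ').replace('  ', ' ').strip()
--
--     # Common test patterns for different panel types
--     panel_test_patterns = {
--         'cbc': ['wbc', 'rbc', 'hemoglobin', 'hematocrit', 'mcv', 'mch', 'mchc', 'rdw', 'platelets', 'neutrophils', 'lymphs', 'monocytes', 'eos', 'basos', 'platelet'],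
--         'metabolic': ['glucose', 'bun', 'creatinine', 'egfr', 'sodium', 'potassium', 'chloride', 'co2', 'carbon dioxide', 'albumin', 'protein', 'bilirubin', 'alkaline', 'ast', 'alt'],
--         'lipid': ['cholesterol', 'triglycerides', 'hdl', 'ldl', 'vldl'],
--         'hepatitis': ['hbsag', 'hcv', 'hep a', 'hep b', 'hepatitis'],
--         'thyroid': ['tsh', 'thyroid'],
--         'vitamin': ['vitamin', 'b12', 'folate'],
--         'hormone': ['testosterone', 'estrogen', 'hormone'],
--         'diabetes': ['a1c', 'hemoglobin a1c']
--     }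
--
--     # Try to match test to panel type, then find corresponding ordered panel
--     best_match = None
--     best_match_count = 0
--
--     # Check each panel type in order of specificity (most specific first)
--     for panel_type, test_patterns in panel_test_patterns.items():
--         # Check if the test name matches any pattern in this panel type
--         matches = sum(1 for pattern in test_patterns if pattern in test_name_lower)
--
--         if matches > 0:
--             # Find the ordered panel that matches this type
--             for ordered_panel in ordered_panels:
--                 ordered_panel_lower = ordered_panel.lower()
--
--                 # More specific matching logic - check most specific patterns first
--                 type_match = False
--
--                 if panel_type == 'metabolic':
--                     # Metabolic panels: must contain "metabolic" OR be a CMP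
--                     if 'metabolic' in ordered_panel_lower or 'cmp' in ordered_panel_lower:
--                         type_match = True
--                 elif panel_type == 'cbc':
--                     # CBC panels: must contain "cbc" OR "blood count" but NOT metabolic
--                     if ('cbc' in ordered_panel_lower or 'blood count' in ordered_panel_lower) and 'metabolic' not in ordered_panel_lower:
--                         type_match = True
--                 elif panel_type == 'lipid':
--                     if 'lipid' in ordered_panel_lower:
--                         type_match = True
--                 elif panel_type == 'hepatitis':
--                     if 'hepatitis' in ordered_panel_lower:
--                         type_match = True
--                 elif panel_type == 'thyroid':
--                     if 'thyroid' in ordered_panel_lower: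
--                         type_match = True
--                 elif panel_type == 'vitamin':
--                     if 'vitamin' in ordered_panel_lower:
--                         type_match = True
--                 elif panel_type == 'hormone':
--                     if 'hormone' in ordered_panel_lower or 'testosterone' in ordered_panel_lower:
--                         type_match = True
--                 elif panel_type == 'diabetes':
--                     if 'a1c' in ordered_panel_lower:
--                         type_match = True
--
--                 if type_match and matches > best_match_count:
--                     best_match = ordered_panel
--                     best_match_count = matches
--
--     return best_match
-- ===== SOURCE B (Python) =====
-- TABLE = [
--     (['wbc', 'rbc', 'hemoglobin', 'hematocrit', 'mcv', 'mch', 'mchc', 'rdw', 'platelets', 'neutrophils', 'lymphs', 'monocytes', 'eos', 'basos', 'platelet'],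
--      lambda p: ('cbc' in p or 'blood count' in p) and 'metabolic' not in p),
--     (['glucose', 'bun', 'creatinine', 'egfr', 'sodium', 'potassium', 'chloride', 'co2', 'carbon dioxide', 'albumin', 'protein', 'bilirubin', 'alkaline', 'ast', 'alt'],
--      lambda p: 'metabolic' in p or 'cmp' in p),
--     (['cholesterol', 'triglycerides', 'hdl', 'ldl', 'vldl'],
--      lambda p: 'lipid' in p),
--     (['hbsag', 'hcv', 'hep a', 'hep b', 'hepatitis'],
--      lambda p: 'hepatitis' in p),
--     (['tsh', 'thyroid'],
--      lambda p: 'thyroid' in p),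
--     (['vitamin', 'b12', 'folate'],
--      lambda p: 'vitamin' in p),
--     (['testosterone', 'estrogen', 'hormone'],
--      lambda p: 'hormone' in p or 'testosterone' in p),
--     (['a1c', 'hemoglobin a1c'],
--      lambda p: 'a1c' in p),
-- ]
--
--
-- def infer_panel_from_test_name(test_name, ordered_panels):
--     """Panel-major single pass: instead of rescanning the panel list once per
--     panel type, scan the panels ONCE, retiring each still-pending type at its
--     first matching panel; then pick the candidate with max count / least type
--     index."""
--     if not test_name or not ordered_panels:
--         return None
--
--     t = test_name.lower().replace('\n', ' ').replace('  ', ' ').strip()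
--
--     # one pass over the pattern table: pending types with positive match count
--     pending = []
--     for i, (patterns, pred) in enumerate(TABLE):
--         c = sum(1 for pat in patterns if pat in t)
--         if c > 0:
--             pending.append((i, c, pred))
--
--     # one pass over the panels: each pending type is resolved (or not) at the
--     # first panel satisfying its predicate, then removed from the pending set
--     candidates = []
--     for panel in ordered_panels:
--         if not pending:
--             break
--         pl = panel.lower()
--         hits = [e for e in pending if e[2](pl)]
--         pending = [e for e in pending if not e[2](pl)]
--         for i, c, _ in hits:
--             candidates.append((c, i, panel))
--
--     # select max count, ties toward the smallest type index
--     best = None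
--     for cand in candidates:
--         if best is None or cand[0] > best[0] or (cand[0] == best[0] and cand[1] < best[1]):
--             best = cand
--     return best[2] if best is not None else None
-- ===== Notes on version B (the rewrite author's own statement) =====
-- stated objective: alternative
-- what changed: Inverts the traversal: instead of A's type-major nested loops (for each panel type, rescan the whole panel list updating a running best), B makes a single panel-major pass that retires each pending panel type at its first matching panel into a candidate list, followed by a separate max-count/least-type-index selection; correct because A's winner is exactly the candidate with maximal match count and, on ties, smallest type index.
import Mathlib
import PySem

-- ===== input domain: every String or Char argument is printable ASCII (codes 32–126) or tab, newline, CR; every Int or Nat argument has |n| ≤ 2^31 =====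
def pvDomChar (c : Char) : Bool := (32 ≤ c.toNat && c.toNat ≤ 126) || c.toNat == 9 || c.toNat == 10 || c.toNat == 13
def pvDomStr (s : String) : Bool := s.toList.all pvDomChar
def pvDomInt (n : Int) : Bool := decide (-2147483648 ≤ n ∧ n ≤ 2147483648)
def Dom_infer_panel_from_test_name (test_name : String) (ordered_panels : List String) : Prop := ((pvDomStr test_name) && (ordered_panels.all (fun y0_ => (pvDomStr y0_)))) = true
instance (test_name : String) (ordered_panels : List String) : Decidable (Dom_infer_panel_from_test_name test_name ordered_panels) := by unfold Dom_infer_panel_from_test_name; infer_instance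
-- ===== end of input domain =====

-- B inverts the traversal: a single panel-major pass retires each pending panel
-- type at its first matching panel into a candidate list, then a separate
-- max-count / least-type-index selection (objective: alternative decomposition).

-- ===== PORT A =====
-- the `type_match` if-elif chain of A's inner loop body, transliterated
def typeMatchA (panel_type : String) (opl : String) : Bool :=
  if panel_type == "metabolic" then
    PySem.Str.isIn "metabolic" opl || PySem.Str.isIn "cmp" opl
  else if panel_type == "cbc" then
    (PySem.Str.isIn "cbc" opl || PySem.Str.isIn "blood count" opl) && !PySem.Str.isIn "metabolic" opl
  else if panel_type == "lipid" then PySem.Str.isIn "lipid" opl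
  else if panel_type == "hepatitis" then PySem.Str.isIn "hepatitis" opl
  else if panel_type == "thyroid" then PySem.Str.isIn "thyroid" opl
  else if panel_type == "vitamin" then PySem.Str.isIn "vitamin" opl
  else if panel_type == "hormone" then PySem.Str.isIn "hormone" opl || PySem.Str.isIn "testosterone" opl
  else if panel_type == "diabetes" then PySem.Str.isIn "a1c" opl
  else false

def panelTestPatternsA : PySem.Dict String (List String) :=
  PySem.Dict.ofList
    [ ("cbc", ["wbc", "rbc", "hemoglobin", "hematocrit", "mcv", "mch", "mchc", "rdw", "platelets", "neutrophils", "lymphs", "monocytes", "eos", "basos", "platelet"])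
    , ("metabolic", ["glucose", "bun", "creatinine", "egfr", "sodium", "potassium", "chloride", "co2", "carbon dioxide", "albumin", "protein", "bilirubin", "alkaline", "ast", "alt"])
    , ("lipid", ["cholesterol", "triglycerides", "hdl", "ldl", "vldl"])
    , ("hepatitis", ["hbsag", "hcv", "hep a", "hep b", "hepatitis"])
    , ("thyroid", ["tsh", "thyroid"])
    , ("vitamin", ["vitamin", "b12", "folate"])
    , ("hormone", ["testosterone", "estrogen", "hormone"])
    , ("diabetes", ["a1c", "hemoglobin a1c"]) ]

def infer_panel_from_test_name (test_name : String) (ordered_panels : List String) : Option String :=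
  if test_name = "" ∨ ordered_panels = [] then none
  else
    let test_name_lower :=
      PySem.Str.strip (PySem.Str.replace (PySem.Str.replace (PySem.Str.lower test_name) "\n" " ") "  " " ")
    let final :=
      (panelTestPatternsA.items).foldl
        (fun (st : Option String × Int) row =>
          let matchCount : Int :=
            row.2.foldl (fun acc pattern => if PySem.Str.isIn pattern test_name_lower then acc + 1 else acc) 0
          if matchCount > 0 then
            ordered_panels.foldl
              (fun (st2 : Option String × Int) ordered_panel =>
                let opl := PySem.Str.lower ordered_panel
                if typeMatchA row.1 opl && decide (st2.2 < matchCount) then (some ordered_panel, matchCount)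
                else st2)
              st
          else st)
        (none, 0)
    final.1

-- ===== PORT B =====
def tableB : List (List String × (String → Bool)) :=
  [ (["wbc", "rbc", "hemoglobin", "hematocrit", "mcv", "mch", "mchc", "rdw", "platelets", "neutrophils", "lymphs", "monocytes", "eos", "basos", "platelet"],
     fun p => (PySem.Str.isIn "cbc" p || PySem.Str.isIn "blood count" p) && !PySem.Str.isIn "metabolic" p)
  , (["glucose", "bun", "creatinine", "egfr", "sodium", "potassium", "chloride", "co2", "carbon dioxide", "albumin", "protein", "bilirubin", "alkaline", "ast", "alt"],
     fun p => PySem.Str.isIn "metabolic" p || PySem.Str.isIn "cmp" p)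
  , (["cholesterol", "triglycerides", "hdl", "ldl", "vldl"], fun p => PySem.Str.isIn "lipid" p)
  , (["hbsag", "hcv", "hep a", "hep b", "hepatitis"], fun p => PySem.Str.isIn "hepatitis" p)
  , (["tsh", "thyroid"], fun p => PySem.Str.isIn "thyroid" p)
  , (["vitamin", "b12", "folate"], fun p => PySem.Str.isIn "vitamin" p)
  , (["testosterone", "estrogen", "hormone"], fun p => PySem.Str.isIn "hormone" p || PySem.Str.isIn "testosterone" p)
  , (["a1c", "hemoglobin a1c"], fun p => PySem.Str.isIn "a1c" p) ]

-- Source B's panel loop: one pass over the panels, retiring each pending type at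
-- its first matching panel ('hits'), with the early 'break' when none pend
def scanB : List String → List (Int × Int × (String → Bool)) → List (Int × Int × String) → List (Int × Int × String)
  | [], _, candidates => candidates
  | panel :: rest, pending, candidates =>
      if pending.isEmpty then candidates
      else
        let pl := PySem.Str.lower panel
        let hits := pending.filter (fun e => e.2.2 pl)
        let still := pending.filter (fun e => !(e.2.2 pl))
        scanB rest still (candidates ++ hits.map (fun e => (e.2.1, e.1, panel)))

def infer_panel_from_test_name_alt (test_name : String) (ordered_panels : List String) : Option String :=
  if test_name = "" ∨ ordered_panels = [] then none
  else
    let t :=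
      PySem.Str.strip (PySem.Str.replace (PySem.Str.replace (PySem.Str.lower test_name) "\n" " ") "  " " ")
    let pending :=
      (PySem.List.enumerate tableB 0).foldl
        (fun (acc : List (Int × Int × (String → Bool))) ir =>
          let c : Int := ir.2.1.foldl (fun n pat => if PySem.Str.isIn pat t then n + 1 else n) 0
          if c > 0 then acc ++ [(ir.1, c, ir.2.2)] else acc)
        []
    let candidates := scanB ordered_panels pending []
    let best :=
      candidates.foldl
        (fun (best : Option (Int × Int × String)) cand =>
          match best with
          | none => some cand
          | some b => if cand.1 > b.1 ∨ (cand.1 = b.1 ∧ cand.2.1 < b.2.1) then some cand else best)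
        none
    best.map (·.2.2)

-- ===== PRECONDITION & SPEC =====
def Spec_infer_panel_from_test_name (test_name : String) (ordered_panels : List String) (out : Option String) : Prop := out = infer_panel_from_test_name_alt test_name ordered_panels
instance (test_name : String) (ordered_panels : List String) (out : Option String) : Decidable (Spec_infer_panel_from_test_name test_name ordered_panels out) := by unfold Spec_infer_panel_from_test_name; infer_instance

-- ===== CLAIM (what is proved, stated in full; the proofs are below) =====
def Claim_equal_infer_panel_from_test_name : Prop := ∀ (test_name : String) (ordered_panels : List String), Dom_infer_panel_from_test_name test_name ordered_panels → Spec_infer_panel_from_test_name test_name ordered_panels (infer_panel_from_test_name test_name ordered_panels)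

-- ===== LEMMAS AND PROOFS =====

-- ---- A-side machinery (pairs (count, panel)): A's nested greedy fold as a
-- ---- selection over per-type candidates, in type order ----
def aStep (t : String) (ops : List String) (st : Option String × Int)
    (row : List String × (String → Bool)) : Option String × Int :=
  let m : Int := (row.1.countP (fun pat => PySem.Str.isIn pat t) : Nat)
  if m > 0 then
    ops.foldl
      (fun (st2 : Option String × Int) op =>
        if row.2 (PySem.Str.lower op) && decide (st2.2 < m) then (some op, m) else st2)
      st
  else st

def candOf (t : String) (ops : List String) (row : List String × (String → Bool)) :
    List (Int × String) :=
  let m : Int := (row.1.countP (fun pat => PySem.Str.isIn pat t) : Nat)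
  if m > 0 then
    match ops.find? (fun op => row.2 (PySem.Str.lower op)) with
    | some p => [(m, p)]
    | none => []
  else []

def sel (w : Option (Int × String)) (cand : Int × String) : Option (Int × String) :=
  match w with
  | none => some cand
  | some b => if cand.1 > b.1 then some cand else w

def hSt (w : Option (Int × String)) : Option String × Int :=
  match w with
  | none => (none, 0)
  | some (c, p) => (some p, c)

lemma inner_fold (ops : List String) (pred : String → Bool) (m : Int)
    (b : Option String) (c : Int) :
    ops.foldl
      (fun (st2 : Option String × Int) op =>
        if pred (PySem.Str.lower op) && decide (st2.2 < m) then (some op, m) else st2)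
      (b, c)
    = if c < m then
        (match ops.find? (fun op => pred (PySem.Str.lower op)) with
         | some p => (some p, m)
         | none => (b, c))
      else (b, c) := by
  induction ops generalizing b c with
  | nil => simp
  | cons op rest ih =>
    simp only [List.foldl_cons, List.find?_cons]
    by_cases hcond : (pred (PySem.Str.lower op) && decide (c < m)) = true
    · obtain ⟨hp, hc⟩ := Bool.and_eq_true_iff.mp hcond
      have hc' : c < m := of_decide_eq_true hc
      rw [if_pos hcond, ih (some op) m, hp]
      simp [hc']
    · rw [if_neg hcond, ih b c]
      by_cases hp : pred (PySem.Str.lower op) = true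
      · have hc : ¬ c < m := by
          intro h
          exact hcond (by simp [hp, h])
        simp [hc]
      · have hp' : pred (PySem.Str.lower op) = false := by
          simpa using hp
        simp [hp']

lemma main_fold (t : String) (ops : List String)
    (rows : List (List String × (String → Bool))) :
    ∀ (b : Option String) (c : Int), (b = none → c = 0) → (0 ≤ c) →
    rows.foldl (aStep t ops) (b, c)
      = hSt ((rows.flatMap (candOf t ops)).foldl sel (b.map (fun p => (c, p)))) := by
  induction rows with
  | nil =>
    intro b c hb hc
    cases b with
    | none => simp [hSt, hb rfl]
    | some q => simp [hSt]
  | cons row rest ih =>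
    intro b c hb hc
    simp only [List.foldl_cons, List.flatMap_cons, List.foldl_append]
    set m : Int := ((row.1.countP (fun pat => PySem.Str.isIn pat t) : Nat) : Int) with hm
    by_cases hm0 : m > 0
    · cases hf : ops.find? (fun op => row.2 (PySem.Str.lower op)) with
      | none =>
        have ha : aStep t ops (b, c) row = (b, c) := by
          simp only [aStep, ← hm, if_pos hm0, inner_fold, hf]
          split <;> rfl
        have hcand : candOf t ops row = [] := by
          simp only [candOf]
          rw [← hm, if_pos hm0, hf]
        rw [ha, hcand]
        simpa using ih b c hb hc
      | some p =>
        have ha : aStep t ops (b, c) row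
            = if c < m then (some p, m) else (b, c) := by
          simp only [aStep, ← hm, if_pos hm0, inner_fold, hf]
        have hcand : candOf t ops row = [(m, p)] := by
          simp only [candOf]
          rw [← hm, if_pos hm0, hf]
        rw [ha, hcand]
        cases b with
        | none =>
          have hc0 : c = 0 := hb rfl
          have hcm : c < m := by omega
          rw [if_pos hcm]
          have := ih (some p) m (by simp) (by omega)
          rw [this]
          simp [sel]
        | some q =>
          by_cases hcm : c < m
          · rw [if_pos hcm]
            have := ih (some p) m (by simp) (by omega)
            rw [this]
            simp only [List.foldl_cons, List.foldl_nil, Option.map_some, sel]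
            rw [if_pos (by exact hcm)]
          · rw [if_neg hcm]
            have := ih (some q) c (by simp) hc
            rw [this]
            simp only [List.foldl_cons, List.foldl_nil, Option.map_some, sel]
            rw [if_neg (by exact hcm)]
    · have ha : aStep t ops (b, c) row = (b, c) := by
        simp only [aStep]
        rw [← hm, if_neg hm0]
      have hcand : candOf t ops row = [] := by
        simp only [candOf]
        rw [← hm, if_neg hm0]
      rw [ha, hcand]
      simpa using ih b c hb hc

lemma tableB_eq :
    tableB = (panelTestPatternsA.items).map (fun r => (r.2, typeMatchA r.1)) := by
  rfl

lemma hSt_fst (w : Option (Int × String)) :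
    (hSt w).1 = Option.map (fun x : Int × String => x.2) w := by
  cases w with
  | none => rfl
  | some cp => rfl

-- ---- B-side machinery: triples (count, type index, panel) ----
abbrev better (a b : Int × Int × String) : Prop :=
  a.1 > b.1 ∨ (a.1 = b.1 ∧ a.2.1 < b.2.1)

def selB (w : Option (Int × Int × String)) (c : Int × Int × String) :
    Option (Int × Int × String) :=
  match w with
  | none => some c
  | some b => if c.1 > b.1 ∨ (c.1 = b.1 ∧ c.2.1 < b.2.1) then some c else w

def sel3 (w : Option (Int × Int × String)) (c : Int × Int × String) :
    Option (Int × Int × String) :=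
  match w with
  | none => some c
  | some b => if c.1 > b.1 then some c else w

def drop3 (e : Int × Int × String) : Int × String := (e.1, e.2.2)

def candOf3 (t : String) (ops : List String)
    (ir : Int × (List String × (String → Bool))) : List (Int × Int × String) :=
  if ((ir.2.1.countP (fun pat => PySem.Str.isIn pat t) : Nat) : Int) > 0 then
    match ops.find? (fun op => ir.2.2 (PySem.Str.lower op)) with
    | some p => [(((ir.2.1.countP (fun pat => PySem.Str.isIn pat t) : Nat) : Int), ir.1, p)]
    | none => []
  else []

def fpB (ops : List String) (e : Int × Int × (String → Bool)) : List (Int × Int × String) :=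
  match ops.find? (fun op => e.2.2 (PySem.Str.lower op)) with
  | some p => [(e.2.1, e.1, p)]
  | none => []

def hselP (t : String) (ir : Int × (List String × (String → Bool))) :
    Option (Int × Int × (String → Bool)) :=
  if ((ir.2.1.countP (fun pat => PySem.Str.isIn pat t) : Nat) : Int) > 0 then
    some (ir.1, ((ir.2.1.countP (fun pat => PySem.Str.isIn pat t) : Nat) : Int), ir.2.2)
  else none

-- candOf is the index-forgetting image of candOf3
lemma candOf_eq_map (t : String) (ops : List String)
    (ir : Int × (List String × (String → Bool))) :
    candOf t ops ir.2 = (candOf3 t ops ir).map drop3 := by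
  simp only [candOf, candOf3]
  split
  · cases hf : ops.find? (fun op => ir.2.2 (PySem.Str.lower op)) <;> simp [drop3]
  · simp

lemma Cp_eq (t : String) (ops : List String) :
    tableB.flatMap (candOf t ops)
      = ((PySem.List.enumerate tableB 0).flatMap (candOf3 t ops)).map drop3 := by
  rw [List.map_flatMap]
  conv_lhs => rw [← PySem.List.map_snd_enumerate tableB 0]
  rw [List.flatMap_map]
  have : (fun ir : Int × (List String × (String → Bool)) => candOf t ops ir.2)
      = fun ir => (candOf3 t ops ir).map drop3 := funext (candOf_eq_map t ops)
  rw [this]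

lemma foldl_sel_map (K : List (Int × Int × String)) :
    ∀ (w : Option (Int × Int × String)),
      (K.map drop3).foldl sel (w.map drop3) = (K.foldl sel3 w).map drop3 := by
  induction K with
  | nil => intro w; simp
  | cons c K ih =>
    intro w
    simp only [List.map_cons, List.foldl_cons]
    have : sel (w.map drop3) (drop3 c) = (sel3 w c).map drop3 := by
      cases w with
      | none => rfl
      | some b =>
        simp only [Option.map_some, sel, sel3, drop3]
        split <;> simp [drop3]
    rw [this, ih]

-- basic facts about `better`
lemma better_irrefl (a : Int × Int × String) : ¬ better a a := by
  simp only [better]; omega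

lemma better_trans {a b c : Int × Int × String}
    (h1 : better a b) (h2 : better b c) : better a c := by
  simp only [better] at *; omega

lemma not_not_key {a b : Int × Int × String}
    (h1 : ¬ better a b) (h2 : ¬ better b a) : a.1 = b.1 ∧ a.2.1 = b.2.1 := by
  simp only [better] at *; omega

lemma better_congr {a b c : Int × Int × String}
    (hk : a.1 = b.1) (ht : a.2.1 = b.2.1) : better a c ↔ better b c := by
  simp only [better, hk, ht]

-- B's selection fold returns a member no member beats
lemma foldlB_some (K : List (Int × Int × String)) :
    ∀ (b : Int × Int × String),
      ∃ e, K.foldl selB (some b) = some e ∧ (e = b ∨ e ∈ K) ∧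
        ∀ x, (x = b ∨ x ∈ K) → ¬ better x e := by
  induction K with
  | nil =>
    intro b
    refine ⟨b, rfl, Or.inl rfl, ?_⟩
    rintro x (rfl | hx)
    · exact better_irrefl x
    · simp at hx
  | cons c K ih =>
    intro b
    have hstep : selB (some b) c
        = if c.1 > b.1 ∨ (c.1 = b.1 ∧ c.2.1 < b.2.1) then some c else some b := rfl
    rw [List.foldl_cons, hstep]
    by_cases hcb : better c b
    · rw [if_pos hcb]
      obtain ⟨e, he, hmem, hbest⟩ := ih c
      refine ⟨e, he, ?_, ?_⟩
      · rcases hmem with rfl | h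
        · exact Or.inr (List.mem_cons_self ..)
        · exact Or.inr (List.mem_cons_of_mem _ h)
      · rintro x (rfl | hx)
        · exact fun hbe => hbest c (Or.inl rfl) (better_trans hcb hbe)
        · rcases List.mem_cons.mp hx with rfl | hx'
          · exact hbest x (Or.inl rfl)
          · exact hbest x (Or.inr hx')
    · rw [if_neg hcb]
      obtain ⟨e, he, hmem, hbest⟩ := ih b
      refine ⟨e, he, ?_, ?_⟩
      · rcases hmem with rfl | h
        · exact Or.inl rfl
        · exact Or.inr (List.mem_cons_of_mem _ h)
      · rintro x (rfl | hx)
        · exact hbest x (Or.inl rfl)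
        · rcases List.mem_cons.mp hx with rfl | hx'
          · intro hce
            by_cases hbc : better b x
            · exact hbest b (Or.inl rfl) (better_trans hbc hce)
            · have hk := not_not_key hcb hbc
              exact hbest b (Or.inl rfl) ((better_congr hk.1 hk.2).mp hce)
          · exact hbest x (Or.inr hx')

-- A's selection fold (count-only, strict) on a type-index-sorted list also
-- returns a member no member beats
lemma foldl3_some (K : List (Int × Int × String)) :
    ∀ (b : Int × Int × String), (∀ x ∈ K, b.2.1 < x.2.1) →
      K.Pairwise (fun a c => a.2.1 < c.2.1) →
      ∃ e, K.foldl sel3 (some b) = some e ∧ (e = b ∨ e ∈ K) ∧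
        ∀ x, (x = b ∨ x ∈ K) → ¬ better x e := by
  induction K with
  | nil =>
    intro b _ _
    refine ⟨b, rfl, Or.inl rfl, ?_⟩
    rintro x (rfl | hx)
    · exact better_irrefl x
    · simp at hx
  | cons c K ih =>
    intro b hlt hpw
    obtain ⟨hc, hpw'⟩ := List.pairwise_cons.mp hpw
    have hstep : sel3 (some b) c = if c.1 > b.1 then some c else some b := rfl
    rw [List.foldl_cons, hstep]
    by_cases hcb : c.1 > b.1
    · rw [if_pos hcb]
      obtain ⟨e, he, hmem, hbest⟩ := ih c hc hpw'
      refine ⟨e, he, ?_, ?_⟩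
      · rcases hmem with rfl | h
        · exact Or.inr (List.mem_cons_self ..)
        · exact Or.inr (List.mem_cons_of_mem _ h)
      · rintro x (rfl | hx)
        · exact fun hbe => hbest c (Or.inl rfl) (better_trans (Or.inl hcb) hbe)
        · rcases List.mem_cons.mp hx with rfl | hx'
          · exact hbest x (Or.inl rfl)
          · exact hbest x (Or.inr hx')
    · rw [if_neg hcb]
      obtain ⟨e, he, hmem, hbest⟩ := ih b (fun x hx => hlt x (List.mem_cons_of_mem _ hx)) hpw'
      refine ⟨e, he, ?_, ?_⟩
      · rcases hmem with rfl | h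
        · exact Or.inl rfl
        · exact Or.inr (List.mem_cons_of_mem _ h)
      · rintro x (rfl | hx)
        · exact hbest x (Or.inl rfl)
        · rcases List.mem_cons.mp hx with rfl | hx'
          · intro hce
            have hbx : better b x := by
              have := hlt x (List.mem_cons_self ..)
              simp only [better]; omega
            exact hbest b (Or.inl rfl) (better_trans hbx hce)
          · exact hbest x (Or.inr hx')

-- uniqueness of an unbeaten member on a list with distinct type indices
lemma good_unique {K : List (Int × Int × String)}
    (hK : K.Pairwise (fun a b => a.2.1 < b.2.1)) {e e' : Int × Int × String}
    (he : e ∈ K) (he' : e' ∈ K)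
    (hb : ∀ x ∈ K, ¬ better x e) (hb' : ∀ x ∈ K, ¬ better x e') : e = e' := by
  have hkey := not_not_key (hb e' he') (hb' e he)
  by_contra hne
  have hNe : (fun a b : Int × Int × String => a.2.1 ≠ b.2.1) e' e :=
    List.Pairwise.forall (fun _ _ h => h.symm)
      (hK.imp (fun h => ne_of_lt h)) he' he (fun h => hne h.symm)
  exact hNe hkey.2

-- the panel-major scan produces, up to permutation, one candidate per pending
-- type: its count, its index, and its first matching panel
lemma flatMap_eq_map_of {α β : Type} (f : α → List β) (g : α → β) :
    ∀ (l : List α), (∀ e ∈ l, f e = [g e]) → l.flatMap f = l.map g := by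
  intro l
  induction l with
  | nil => intro _; rfl
  | cons a l ih =>
    intro h
    rw [List.flatMap_cons, List.map_cons, h a (List.mem_cons_self ..),
      ih (fun e he => h e (List.mem_cons_of_mem _ he))]
    rfl

lemma flatMap_congr_mem {α β : Type} (f g : α → List β) :
    ∀ (l : List α), (∀ e ∈ l, f e = g e) → l.flatMap f = l.flatMap g := by
  intro l
  induction l with
  | nil => intro _; rfl
  | cons a l ih =>
    intro h
    rw [List.flatMap_cons, List.flatMap_cons, h a (List.mem_cons_self ..),
      ih (fun e he => h e (List.mem_cons_of_mem _ he))]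

lemma scanB_perm :
    ∀ (panels : List String) (pending : List (Int × Int × (String → Bool)))
      (acc : List (Int × Int × String)),
      (scanB panels pending acc).Perm (acc ++ pending.flatMap (fpB panels)) := by
  intro panels
  induction panels with
  | nil =>
    intro pending acc
    have : pending.flatMap (fpB []) = [] := by
      apply List.flatMap_eq_nil_iff.mpr
      intro e _
      rfl
    simp [scanB, this]
  | cons panel rest ih =>
    intro pending acc
    simp only [scanB]
    by_cases hp : pending.isEmpty
    · rw [if_pos hp]
      have : pending = [] := List.isEmpty_iff.mp hp
      subst this
      simp
    · rw [if_neg hp]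
      refine (ih _ _).trans ?_
      rw [List.append_assoc]
      apply List.Perm.append_left
      have hhits :
          (pending.filter (fun e => e.2.2 (PySem.Str.lower panel))).map
              (fun e => (e.2.1, e.1, panel))
            = (pending.filter (fun e => e.2.2 (PySem.Str.lower panel))).flatMap
                (fpB (panel :: rest)) := by
        refine (flatMap_eq_map_of _ _ _ ?_).symm
        intro e he
        have hpred : e.2.2 (PySem.Str.lower panel) = true := (List.mem_filter.mp he).2
        simp only [fpB]
        rw [List.find?_cons_of_pos (by simpa using hpred)]
      have hstill :
          (pending.filter (fun e => !(e.2.2 (PySem.Str.lower panel)))).flatMap (fpB rest)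
            = (pending.filter (fun e => !(e.2.2 (PySem.Str.lower panel)))).flatMap
                (fpB (panel :: rest)) := by
        refine flatMap_congr_mem _ _ _ ?_
        intro e he
        have hpred : e.2.2 (PySem.Str.lower panel) = false := by
          have := (List.mem_filter.mp he).2
          simpa using this
        simp only [fpB]
        rw [List.find?_cons_of_neg (by simp [hpred])]
      rw [hhits, hstill, ← List.flatMap_append]
      exact List.Perm.flatMap_right (fpB (panel :: rest))
        (List.filter_append_perm _ pending)

-- Source B's table pass builds exactly the pending list of positive-count types
lemma pending_spec (t : String) :
    ∀ (l : List (Int × (List String × (String → Bool))))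
      (acc : List (Int × Int × (String → Bool))),
      l.foldl
        (fun (acc : List (Int × Int × (String → Bool))) ir =>
          let c : Int := ir.2.1.foldl (fun n pat => if PySem.Str.isIn pat t then n + 1 else n) 0
          if c > 0 then acc ++ [(ir.1, c, ir.2.2)] else acc)
        acc
      = acc ++ l.filterMap (hselP t) := by
  intro l
  induction l with
  | nil => intro acc; simp
  | cons ir l ih =>
    intro acc
    rw [List.foldl_cons, List.filterMap_cons]
    have hc : (ir.2.1.foldl (fun n pat => if PySem.Str.isIn pat t then n + 1 else n) (0 : Int))
        = ((ir.2.1.countP (fun pat => PySem.Str.isIn pat t) : Nat) : Int) := by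
      rw [PySem.List.foldl_if_add_one, zero_add]
    simp only [hc]
    by_cases hm : ((ir.2.1.countP (fun pat => PySem.Str.isIn pat t) : Nat) : Int) > 0
    · have h1 : hselP t ir
          = some (ir.1, ((ir.2.1.countP (fun pat => PySem.Str.isIn pat t) : Nat) : Int), ir.2.2) := by
        rw [hselP, if_pos hm]
      rw [if_pos hm, ih, h1]
      simp
    · have h1 : hselP t ir = none := by
        rw [hselP, if_neg hm]
      rw [if_neg hm, ih, h1]

-- resolving the pending types against the panels yields the candidate lists
lemma fp_filterMap (t : String) (ops : List String) :
    ∀ (l : List (Int × (List String × (String → Bool)))),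
      (l.filterMap (hselP t)).flatMap (fpB ops) = l.flatMap (candOf3 t ops) := by
  intro l
  induction l with
  | nil => rfl
  | cons ir l ih =>
    rw [List.filterMap_cons, List.flatMap_cons]
    by_cases hm : ((ir.2.1.countP (fun pat => PySem.Str.isIn pat t) : Nat) : Int) > 0
    · have h1 : hselP t ir
          = some (ir.1, ((ir.2.1.countP (fun pat => PySem.Str.isIn pat t) : Nat) : Int), ir.2.2) := by
        rw [hselP, if_pos hm]
      rw [h1, List.flatMap_cons, ih]
      have : fpB ops (ir.1, ((ir.2.1.countP (fun pat => PySem.Str.isIn pat t) : Nat) : Int), ir.2.2)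
          = candOf3 t ops ir := by
        simp only [fpB, candOf3, if_pos hm]
      rw [this]
    · have h1 : hselP t ir = none := by rw [hselP, if_neg hm]
      rw [h1, ih]
      have : candOf3 t ops ir = [] := by simp only [candOf3, if_neg hm]
      rw [this]
      rfl

lemma mem_candOf3_ti (t : String) (ops : List String)
    {ir : Int × (List String × (String → Bool))} {x : Int × Int × String}
    (hx : x ∈ candOf3 t ops ir) : x.2.1 = ir.1 := by
  simp only [candOf3] at hx
  split at hx
  · split at hx
    · simp at hx
      subst hx
      rfl
    · simp at hx
  · simp at hx

lemma C3_pairwise (t : String) (ops : List String) :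
    ∀ (l : List (Int × (List String × (String → Bool)))),
      l.Pairwise (fun a b => a.1 < b.1) →
      (l.flatMap (candOf3 t ops)).Pairwise
        (fun a b : Int × Int × String => a.2.1 < b.2.1) := by
  intro l
  induction l with
  | nil => intro _; simp
  | cons ir l ih =>
    intro hpw
    obtain ⟨hhead, hpw'⟩ := List.pairwise_cons.mp hpw
    rw [List.flatMap_cons]
    refine List.pairwise_append.mpr ⟨?_, ih hpw', ?_⟩
    · simp only [candOf3]
      split
      · split <;> simp
      · simp
    · intro x hx y hy
      obtain ⟨jr, hjr, hyj⟩ := List.mem_flatMap.mp hy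
      rw [mem_candOf3_ti t ops hx, mem_candOf3_ti t ops hyj]
      exact hhead jr hjr

-- ===== VERDICT (by name: the statement is the Claim_ definition above) =====
theorem infer_panel_from_test_name_spec : Claim_equal_infer_panel_from_test_name := by
  intro test_name ordered_panels _dom
  unfold Spec_infer_panel_from_test_name
  unfold infer_panel_from_test_name infer_panel_from_test_name_alt
  by_cases hg : test_name = "" ∨ ordered_panels = []
  · simp [hg]
  · rw [if_neg hg, if_neg hg]
    set t := PySem.Str.strip (PySem.Str.replace (PySem.Str.replace (PySem.Str.lower test_name) "\n" " ") "  " " ") with ht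
    -- A side: nested greedy fold = hSt of count-only selection over candidates
    have hA :
        ((panelTestPatternsA.items).foldl
          (fun (st : Option String × Int) row =>
            let matchCount : Int :=
              row.2.foldl (fun acc pattern => if PySem.Str.isIn pattern t then acc + 1 else acc) 0
            if matchCount > 0 then
              ordered_panels.foldl
                (fun (st2 : Option String × Int) ordered_panel =>
                  let opl := PySem.Str.lower ordered_panel
                  if typeMatchA row.1 opl && decide (st2.2 < matchCount) then (some ordered_panel, matchCount)
                  else st2)
                st
            else st)
          (none, 0))
        = tableB.foldl (aStep t ordered_panels) (none, 0) := by
      rw [tableB_eq, List.foldl_map]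
      congr 1
      funext st row
      simp only [aStep, PySem.List.foldl_if_add_one, zero_add]
    have hB := pending_spec t (PySem.List.enumerate tableB 0) []
    simp only [hA, hB, List.nil_append]
    rw [main_fold t ordered_panels tableB none 0 (fun _ => rfl) le_rfl]
    rw [hSt_fst]
    simp only [Option.map_none]
    set C3 := (PySem.List.enumerate tableB 0).flatMap (candOf3 t ordered_panels) with hC3
    rw [Cp_eq t ordered_panels]
    have hmapfold := foldl_sel_map C3 none
    simp only [Option.map_none] at hmapfold
    rw [hmapfold]
    have hselB_eq :
        (fun (best : Option (Int × Int × String)) cand =>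
          match best with
          | none => some cand
          | some b => if cand.1 > b.1 ∨ (cand.1 = b.1 ∧ cand.2.1 < b.2.1) then some cand else best)
        = selB := by
      funext w c
      cases w <;> rfl
    rw [hselB_eq]
    set P := (PySem.List.enumerate tableB 0).filterMap (hselP t) with hP
    set L := scanB ordered_panels P [] with hL
    have hperm : L.Perm C3 := by
      have := scanB_perm ordered_panels P []
      rw [List.nil_append, hP, fp_filterMap t ordered_panels] at this
      exact this
    have hpw : C3.Pairwise (fun a b : Int × Int × String => a.2.1 < b.2.1) :=
      C3_pairwise t ordered_panels _ (PySem.List.pairwise_lt_enumerate _ _)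
    -- both selections pick the unique unbeaten candidate
    cases hc3 : C3 with
    | nil =>
      have hLnil : L = [] := (hperm.trans (by rw [hc3])).eq_nil
      rw [hLnil]
      rfl
    | cons c K =>
      rw [hc3] at hpw
      obtain ⟨hhead, hpw'⟩ := List.pairwise_cons.mp hpw
      obtain ⟨e3, he3, hmem3, hbest3⟩ := foldl3_some K c hhead hpw'
      cases hLl : L with
      | nil =>
        exfalso
        rw [hLl] at hperm
        have := hperm.symm.eq_nil
        rw [hc3] at this
        exact List.cons_ne_nil _ _ this
      | cons d M =>
        obtain ⟨eB, heB, hmemB, hbestB⟩ := foldlB_some M d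
        have hmemL : ∀ x, (x = d ∨ x ∈ M) ↔ x ∈ L := by
          intro x
          rw [hLl]
          simp
        have hmemC : ∀ x, (x = c ∨ x ∈ K) ↔ x ∈ C3 := by
          intro x
          rw [hc3]
          simp
        have heq : e3 = eB := by
          apply good_unique (hc3 ▸ hpw : C3.Pairwise _)
          · exact (hmemC e3).mp hmem3
          · exact hperm.mem_iff.mp ((hmemL eB).mp hmemB)
          · intro x hx
            exact hbest3 x ((hmemC x).mpr hx)
          · intro x hx
            exact hbestB x ((hmemL x).mpr (hperm.mem_iff.mpr hx))
        rw [show List.foldl sel3 none (c :: K) = List.foldl sel3 (some c) K from rfl, he3,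
          show List.foldl selB none (d :: M) = List.foldl selB (some d) M from rfl, heB, ← heq]
        rfl
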